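-- pv_equiv track=rewrite | github.com/foteinipapadopoulou/Multinomial-Naive-Bayes | train.py | remove_digits
-- ===== SOURCE A (Python) =====
-- def remove_digits(count_words):
--     to_remove = set()
--     vocabul_to_remove = ['.', ',', ')', '(', "'", "Subject:", "to", "the", "_", "-",
--                          "on", "at", "in", "of", "a", "an", "/"]
--     for k in count_words:
--         if k.isdigit():
--             to_remove.add(k)
--         if k in vocabul_to_remove:
--             to_remove.add(k)
--     for i in to_remove:
--         del count_words[i]
--     to_remove.clear()
--     return count_words
-- ===== SOURCE B (Python) =====
-- def remove_digits(count_words):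
--     # Pass 1: rebuild without digit keys.
--     kept = {k: v for k, v in count_words.items() if not k.isdigit()}
--     # Pass 2: iterate the FIXED stopword list and pop each one (O(1) per word),
--     # instead of testing every key for stopword membership.
--     for w in ['.', ',', ')', '(', "'", "Subject:", "to", "the", "_", "-",
--            "on", "at", "in", "of", "a", "an", "/"]:
--         kept.pop(w, None)
--     count_words.clear()
--     count_words.update(kept)
--     return count_words
-- ===== Notes on version B (the rewrite author's own statement) =====
-- stated objective: alternative
-- what changed: B inverts the traversal: after one pass dropping digit keys, it loops over the 17 fixed stopwords and pops each from the dict in O(1), so A's per-key membership scan against the stopword list (and its collect-then-delete removal set) disappears. Pre_ excludes association lists with duplicate keys, which correspond to no Python dict input.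
import Mathlib
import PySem

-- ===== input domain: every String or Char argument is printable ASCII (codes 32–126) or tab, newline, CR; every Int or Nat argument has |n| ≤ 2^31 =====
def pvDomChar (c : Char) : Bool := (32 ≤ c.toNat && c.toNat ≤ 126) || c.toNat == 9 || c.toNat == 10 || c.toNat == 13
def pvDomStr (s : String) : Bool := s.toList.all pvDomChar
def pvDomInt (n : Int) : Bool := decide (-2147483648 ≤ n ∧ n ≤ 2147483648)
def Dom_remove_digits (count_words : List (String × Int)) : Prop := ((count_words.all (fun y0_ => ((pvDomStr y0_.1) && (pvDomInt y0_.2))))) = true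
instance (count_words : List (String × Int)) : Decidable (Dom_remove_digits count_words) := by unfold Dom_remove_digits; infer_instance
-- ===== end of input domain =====

-- B inverts the traversal: one pass drops digit keys, then a loop over the fixed stopword
-- list pops each stopword from the dict, replacing A's per-key stopword scan and its
-- collect-then-delete removal set (same in-place mutation; equivalence is about the return value).

-- ===== PORT A =====
def pvVocab : List String := [".", ",", ")", "(", "'", "Subject:", "to", "the", "_", "-",
                              "on", "at", "in", "of", "a", "an", "/"]

-- `del d[k]` on the association-list model of a dict: remove the first entry with key k
-- (exact for a dict, whose keys are unique; k is always present when A deletes).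
def pvDel (d : List (String × Int)) (k : String) : List (String × Int) :=
  match d with
  | [] => []
  | (k', v) :: rest => if k' == k then rest else (k', v) :: pvDel rest k

-- One step of A's first loop body: the two independent `if … : to_remove.add(k)` statements.
def pvStep (s : PySem.Set String) (k : String) : PySem.Set String :=
  let s1 := if PySem.Str.strIsdigit k then PySem.Set.add s k else s
  if pvVocab.contains k then PySem.Set.add s1 k else s1

-- A: build the removal set over the keys, then delete each of its elements from the dict.
-- (Python iterates `to_remove` in hash order; the resulting dict is the same for any order,
-- and this port folds in the set's insertion order.)
def remove_digits (count_words : List (String × Int)) : List (String × Int) :=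
  let to_remove : PySem.Set String :=
    count_words.foldl (fun s p => pvStep s p.1) PySem.Set.empty
  to_remove.foldl pvDel count_words

-- ===== PORT B =====
-- `d.pop(k, None)` on the association-list model: drop the first entry with key k, no-op if absent.
def pvPop (d : List (String × Int)) (k : String) : List (String × Int) :=
  match d with
  | [] => []
  | (k', v) :: rest => if k' == k then rest else (k', v) :: pvPop rest k

-- B: keep the non-digit items, then pop each of the 17 fixed stopwords from the result.
def remove_digits_alt (count_words : List (String × Int)) : List (String × Int) :=
  let kept := count_words.filter (fun p => !PySem.Str.strIsdigit p.1)
  ([".", ",", ")", "(", "'", "Subject:", "to", "the", "_", "-",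
    "on", "at", "in", "of", "a", "an", "/"] : List String).foldl pvPop kept

-- ===== PRECONDITION & SPEC =====
-- Pre_ excludes association lists with duplicate keys: a Python dict cannot hold duplicate keys,
-- so such lists correspond to no dict input of A.
def Pre_remove_digits (count_words : List (String × Int)) : Prop :=
  (count_words.map Prod.fst).Nodup
instance (count_words : List (String × Int)) : Decidable (Pre_remove_digits count_words) := by
  unfold Pre_remove_digits; infer_instance

def pvWitness_remove_digits : (List (String × Int)) := [("12", 3), ("to", 1), ("hello", 2)]

def Spec_remove_digits (count_words : List (String × Int)) (out : List (String × Int)) : Prop := out = remove_digits_alt count_words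
instance (count_words : List (String × Int)) (out : List (String × Int)) : Decidable (Spec_remove_digits count_words out) := by unfold Spec_remove_digits; infer_instance

-- ===== CLAIM (what is proved, stated in full; the proofs are below) =====
def Claim_equal_remove_digits : Prop := ∀ (count_words : List (String × Int)), Dom_remove_digits count_words → Pre_remove_digits count_words → Spec_remove_digits count_words (remove_digits count_words)

-- ===== LEMMAS AND PROOFS =====

def pvPred (k : String) : Bool := PySem.Str.strIsdigit k || pvVocab.contains k

theorem pvDel_eq_filter (d : List (String × Int)) (k : String)
    (h : (d.map Prod.fst).Nodup) :
    pvDel d k = d.filter (fun p => p.1 ≠ k) := by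
  induction d with
  | nil => rfl
  | cons p rest ih =>
    obtain ⟨k', v⟩ := p
    simp only [List.map_cons, List.nodup_cons] at h
    by_cases hk : k' = k
    · subst hk
      simp only [pvDel, beq_self_eq_true, if_true, List.filter_cons]
      rw [if_neg (by simp), eq_comm, List.filter_eq_self]
      intro a ha
      have : a.1 ≠ k' := fun he => h.1 (he ▸ List.mem_map_of_mem ha)
      simpa using this
    · simp only [pvDel, beq_iff_eq, if_neg hk, ih h.2, List.filter_cons]
      simp [hk]

theorem pvPop_eq_pvDel (d : List (String × Int)) (k : String) : pvPop d k = pvDel d k := by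
  induction d with
  | nil => rfl
  | cons p rest ih => simp only [pvPop, pvDel, ih]

theorem filter_map_fst_nodup (d : List (String × Int)) (q : String × Int → Bool)
    (h : (d.map Prod.fst).Nodup) : ((d.filter q).map Prod.fst).Nodup :=
  List.Nodup.sublist (List.Sublist.map Prod.fst List.filter_sublist) h

theorem foldl_pvDel_eq_filter (ks : List String) (d : List (String × Int))
    (h : (d.map Prod.fst).Nodup) :
    ks.foldl pvDel d = d.filter (fun p => decide (p.1 ∉ ks)) := by
  induction ks generalizing d with
  | nil => simp
  | cons k ks ih =>
    simp only [List.foldl_cons]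
    rw [pvDel_eq_filter d k h, ih _ (filter_map_fst_nodup d _ h), List.filter_filter]
    apply List.filter_congr
    intro p _
    by_cases h1 : p.1 = k <;> by_cases h2 : p.1 ∈ ks <;> simp [h1, h2]

theorem pvMem_step (s : PySem.Set String) (x k : String) :
    k ∈ pvStep s x ↔ k ∈ s ∨ (k = x ∧ pvPred k = true) := by
  constructor
  · intro hin
    unfold pvStep at hin
    split_ifs at hin with h1 h2 h2 <;> simp only [PySem.Set.mem_add] at hin
    · rcases hin with (hs | he) | he
      · exact Or.inl hs
      · exact Or.inr ⟨he, by subst he; unfold pvPred; rw [h1]; simp⟩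
      · exact Or.inr ⟨he, by subst he; unfold pvPred; rw [h1]; simp⟩
    · rcases hin with hs | he
      · exact Or.inl hs
      · exact Or.inr ⟨he, by subst he; unfold pvPred; rw [h1]; simp⟩
    · rcases hin with hs | he
      · exact Or.inl hs
      · refine Or.inr ⟨he, ?_⟩
        subst he
        unfold pvPred
        rw [h2]
        simp
    · exact Or.inl hin
  · rintro (hs | ⟨he, hp⟩)
    · unfold pvStep
      split_ifs <;> simp [PySem.Set.mem_add, hs]
    · subst he
      unfold pvStep
      split_ifs with h1 h2 h2 <;> simp [PySem.Set.mem_add]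
      unfold pvPred at hp
      simp only [Bool.or_eq_true] at hp
      rcases hp with hd | hc
      · exact absurd hd h1
      · exact absurd hc h2

theorem mem_foldl_pvStep (l : List (String × Int)) (s : PySem.Set String) (k : String) :
    k ∈ l.foldl (fun s p => pvStep s p.1) s ↔
      k ∈ s ∨ (k ∈ l.map Prod.fst ∧ pvPred k = true) := by
  induction l generalizing s with
  | nil => simp
  | cons p rest ih =>
    simp only [List.foldl_cons, ih, List.map_cons, List.mem_cons]
    constructor
    · rintro (hin | ⟨hm, hp⟩)
      · rcases (pvMem_step s p.1 k).mp hin with hs | ⟨he, hp⟩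
        · exact Or.inl hs
        · exact Or.inr ⟨Or.inl he, hp⟩
      · exact Or.inr ⟨Or.inr hm, hp⟩
    · rintro (hs | ⟨he | hm, hp⟩)
      · exact Or.inl ((pvMem_step s p.1 k).mpr (Or.inl hs))
      · exact Or.inl ((pvMem_step s p.1 k).mpr (Or.inr ⟨he, hp⟩))
      · exact Or.inr ⟨hm, hp⟩

-- B unfolded: the digit filter followed by the 17 pops equals one combined filter.
theorem remove_digits_alt_eq_filter (d : List (String × Int))
    (h : (d.map Prod.fst).Nodup) :
    remove_digits_alt d = d.filter (fun p => !pvPred p.1) := by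
  unfold remove_digits_alt
  have hfold : ∀ (ks : List String) (e : List (String × Int)), ks.foldl pvPop e = ks.foldl pvDel e := by
    intro ks
    induction ks with
    | nil => intro e; rfl
    | cons k ks ih => intro e; simp only [List.foldl_cons, pvPop_eq_pvDel, ih]
  rw [hfold, foldl_pvDel_eq_filter _ _ (filter_map_fst_nodup d _ h), List.filter_filter]
  apply List.filter_congr
  intro p _
  show (decide (p.1 ∉ pvVocab) && !PySem.Str.strIsdigit p.1) = !pvPred p.1
  unfold pvPred
  simp [pvVocab, not_or, Bool.and_comm]

-- ===== VERDICT (by name: the statement is the Claim_ definition above) =====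
theorem remove_digits_spec : Claim_equal_remove_digits := by
  intro count_words _ hpre
  unfold Spec_remove_digits
  rw [remove_digits_alt_eq_filter _ hpre]
  unfold remove_digits
  rw [foldl_pvDel_eq_filter _ _ hpre]
  apply List.filter_congr
  intro p hp
  have hk : p.1 ∈ count_words.map Prod.fst := List.mem_map_of_mem hp
  have hiff : p.1 ∈ count_words.foldl (fun s q => pvStep s q.1) PySem.Set.empty ↔
      pvPred p.1 = true := by
    rw [mem_foldl_pvStep]
    simp [PySem.Set.empty, hk]
  cases hb : pvPred p.1 with
  | true =>
    have h1 : p.1 ∈ count_words.foldl (fun s q => pvStep s q.1) PySem.Set.empty :=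
      hiff.mpr hb
    simp only [PySem.Set.empty] at h1
    simp [h1]
  | false =>
    have h1 : p.1 ∉ count_words.foldl (fun s q => pvStep s q.1) PySem.Set.empty :=
      fun hin => by rw [hiff.mp hin] at hb; exact Bool.noConfusion hb
    simp only [PySem.Set.empty] at h1
    simp [h1]
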